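-- pv_equiv track=rewrite | github.com/Aether-Verilys/WorldDataPipeline | ue_pipeline/python/worker_gen_levelsequence.py | _parse_manifest_path
-- ===== SOURCE A (Python) =====
-- from typing import Optional
--
-- def _parse_manifest_path(argv) -> Optional[str]:
--     manifest_path = None
--     for i, arg in enumerate(argv):
--         if arg.startswith("--manifest="):
--             manifest_path = arg.split("=", 1)[1]
--         elif arg == "--manifest" and i + 1 < len(argv):
--             manifest_path = argv[i + 1]
--     return manifest_path
-- ===== SOURCE B (Python) =====
-- from typing import Optional
--
-- def _parse_manifest_path(argv) -> Optional[str]: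
--     # Scan from the end: the first qualifying index from the right is the
--     # last assignment the forward pass would have made.
--     for i in range(len(argv) - 1, -1, -1):
--         arg = argv[i]
--         if arg.startswith("--manifest="):
--             return arg.split("=", 1)[1]
--         if arg == "--manifest" and i + 1 < len(argv):
--             return argv[i + 1]
--     return None
-- ===== Notes on version B (the rewrite author's own statement) =====
-- stated objective: alternative
-- what changed: Replaces the forward accumulate-and-overwrite pass with a reverse scan that returns on the first (highest-index) match, which can stop early instead of always traversing the whole list.
import Mathlib
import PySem

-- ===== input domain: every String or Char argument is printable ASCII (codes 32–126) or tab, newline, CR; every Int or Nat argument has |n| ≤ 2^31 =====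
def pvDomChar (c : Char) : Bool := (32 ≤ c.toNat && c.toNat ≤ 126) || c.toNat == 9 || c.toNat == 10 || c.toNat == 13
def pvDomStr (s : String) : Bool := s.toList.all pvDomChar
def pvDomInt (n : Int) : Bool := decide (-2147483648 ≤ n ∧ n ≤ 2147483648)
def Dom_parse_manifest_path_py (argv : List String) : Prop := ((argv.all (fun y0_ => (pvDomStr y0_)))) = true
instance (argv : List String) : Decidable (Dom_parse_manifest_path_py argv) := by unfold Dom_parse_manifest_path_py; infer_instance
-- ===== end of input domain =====

-- ===== PORT A =====
-- One honest line: B scans argv from the end and returns at the first (highest-index)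
-- match, instead of A's forward pass that keeps overwriting an accumulator.

-- arg.split("=", 1)[1] — only evaluated under the startswith("--manifest=") guard,
-- where the '=' is present, so the Option is always `some`.
def pvSplitVal (arg : String) : Option String :=
  (PySem.Str.splitMax? arg "=" 1).bind (fun parts => parts[1]?)

def parse_manifest_path_py (argv : List String) : Option String :=
  (PySem.List.enumerate argv 0).foldl
    (fun acc p =>
      let i := p.1
      let arg := p.2
      if PySem.Str.startswith arg "--manifest=" then
        pvSplitVal arg
      else if arg = "--manifest" ∧ i + 1 < (argv.length : Int) then
        PySem.List.pyGet? argv (i + 1)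
      else acc)
    none

-- ===== PORT B =====
-- Source B: for i in range(len(argv)-1, -1, -1): …  — structural recursion on the number
-- of indices still to inspect; `n = j+1` means the current index is `j`.
def pvAltGo (argv : List String) : Nat → Option String
  | 0 => none
  | Nat.succ j =>
    match PySem.List.pyGet? argv (j : Int) with
    | none => none
    | some arg =>
      if PySem.Str.startswith arg "--manifest=" then
        pvSplitVal arg
      else if arg = "--manifest" ∧ ((j : Int) + 1 < (argv.length : Int)) then
        PySem.List.pyGet? argv ((j : Int) + 1)
      else pvAltGo argv j

def parse_manifest_path_py_alt (argv : List String) : Option String :=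
  pvAltGo argv argv.length

-- ===== PRECONDITION & SPEC =====
def Spec_parse_manifest_path_py (argv : List String) (out : Option String) : Prop := out = parse_manifest_path_py_alt argv
instance (argv : List String) (out : Option String) : Decidable (Spec_parse_manifest_path_py argv out) := by unfold Spec_parse_manifest_path_py; infer_instance

-- ===== CLAIM (what is proved, stated in full; the proofs are below) =====
def Claim_equal_parse_manifest_path_py : Prop := ∀ (argv : List String), Dom_parse_manifest_path_py argv → Spec_parse_manifest_path_py argv (parse_manifest_path_py argv)

-- ===== LEMMAS AND PROOFS =====

-- A's fold over the first n entries equals B's reverse scan over the first n indices.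
theorem pv_fold_eq_go (argv : List String) (n : Nat) (hn : n ≤ argv.length) :
    (PySem.List.enumerate (argv.take n) 0).foldl
      (fun acc p =>
        let i := p.1
        let arg := p.2
        if PySem.Str.startswith arg "--manifest=" then
          pvSplitVal arg
        else if arg = "--manifest" ∧ i + 1 < (argv.length : Int) then
          PySem.List.pyGet? argv (i + 1)
        else acc)
      none = pvAltGo argv n := by
  induction n with
  | zero => simp [pvAltGo]
  | succ j ih =>
    have hj : j < argv.length := hn
    have htake : argv.take (j + 1) = argv.take j ++ [argv[j]] :=
      List.take_succ_eq_append_getElem hj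
    have hget : PySem.List.pyGet? argv (j : Int) = some argv[j] := by
      simp [hj]
    rw [htake, PySem.List.enumerate_append, List.foldl_append,
        ih (Nat.le_of_lt hj)]
    simp only [PySem.List.enumerate_cons, PySem.List.enumerate_nil,
      List.foldl_cons, List.foldl_nil, List.length_take,
      Nat.min_eq_left (Nat.le_of_lt hj)]
    rw [pvAltGo, hget]
    push_cast
    simp only [zero_add]

-- ===== VERDICT (by name: the statement is the Claim_ definition above) =====
theorem parse_manifest_path_py_spec : Claim_equal_parse_manifest_path_py := by
  intro argv _
  unfold Spec_parse_manifest_path_py parse_manifest_path_py parse_manifest_path_py_alt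
  have := pv_fold_eq_go argv argv.length (le_refl _)
  rwa [List.take_length] at this
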